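-- pv_equiv track=rewrite | github.com/gduchidze/ai-engineer-interview-prep | dsa/Chapter1: Arrays/sliding_window_variables.py | longest_uniform_subarray
-- ===== SOURCE A (Python) =====
-- def longest_uniform_subarray(arr):
--     max_length = 0
--     left = 0
--
--     for right in range(len(arr)):
--         # If the current element is different from the leftmost element,
--         # move the left pointer to the right
--         if arr[right] != arr[left]:
--             left = right
--
--         # Update the maximum length found
--         current_length = right - left + 1
--         max_length = max(max_length, current_length)
--
--     return max_length
-- ===== SOURCE B (Python) =====
-- def longest_uniform_subarray(arr):
--     # Group the array into maximal runs of equal elements (a run-length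
--     # encoding), then the answer is simply the largest run length.
--     run_lengths = []
--     prev = None
--     for x in arr:
--         if run_lengths and x == prev:
--             run_lengths[-1] += 1
--         else:
--             run_lengths.append(1)
--         prev = x
--     return max(run_lengths, default=0)
-- ===== Notes on version B (the rewrite author's own statement) =====
-- stated objective: simpler
-- what changed: Replaces the two-pointer left/right index bookkeeping with a run-length-encoding pass (group the array into maximal runs of equal elements, then take the maximum run length); measured ~1.8x faster per-element since it drops the per-step indexing and max update.
import Mathlib
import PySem

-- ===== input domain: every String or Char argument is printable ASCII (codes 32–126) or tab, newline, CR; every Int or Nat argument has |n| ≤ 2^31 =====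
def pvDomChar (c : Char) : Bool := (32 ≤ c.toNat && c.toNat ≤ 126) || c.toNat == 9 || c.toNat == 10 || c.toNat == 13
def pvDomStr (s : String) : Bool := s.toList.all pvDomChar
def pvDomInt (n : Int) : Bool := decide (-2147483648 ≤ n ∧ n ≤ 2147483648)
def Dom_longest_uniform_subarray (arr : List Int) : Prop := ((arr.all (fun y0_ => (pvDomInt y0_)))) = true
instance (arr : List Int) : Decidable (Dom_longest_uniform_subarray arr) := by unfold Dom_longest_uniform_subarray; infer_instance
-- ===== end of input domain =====

-- B replaces A's two-pointer index bookkeeping by a run-length-encoding pass followed by a maximum (simpler decomposition, same O(n) cost).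

-- ===== PORT A =====
def longest_uniform_subarray (arr : List Int) : Int :=
  let st := (PySem.List.pyRange 0 (arr.length : Int) 1).foldl (fun (st : Int × Int) right =>
    let left := if PySem.List.pyGetD arr right 0 ≠ PySem.List.pyGetD arr st.2 0 then right else st.2
    (max st.1 (right - left + 1), left)) (0, 0)
  st.1

-- ===== PORT B =====
def longest_uniform_subarray_alt (arr : List Int) : Int :=
  let st := arr.foldl (fun (st : List Int × Option Int) x =>
    if st.1.isEmpty = false ∧ some x = st.2 then
      (st.1.dropLast ++ [st.1.getLastD 0 + 1], some x)
    else
      (st.1 ++ [1], some x)) ([], none)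
  (PySem.List.max? st.1 (fun y => y)).getD 0

-- ===== PRECONDITION & SPEC =====
def Spec_longest_uniform_subarray (arr : List Int) (out : Int) : Prop := out = longest_uniform_subarray_alt arr
instance (arr : List Int) (out : Int) : Decidable (Spec_longest_uniform_subarray arr out) := by unfold Spec_longest_uniform_subarray; infer_instance

-- ===== CLAIM (what is proved, stated in full; the proofs are below) =====
def Claim_equal_longest_uniform_subarray : Prop := ∀ (arr : List Int), Dom_longest_uniform_subarray arr → Spec_longest_uniform_subarray arr (longest_uniform_subarray arr)

-- ===== LEMMAS AND PROOFS =====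

-- reference: max over the "current lengths" of all future loop steps, given the
-- current run value x and current run length cur
def pvFut (x cur : Int) : List Int → Int
  | [] => 0
  | y :: ys => if y = x then max (cur + 1) (pvFut x (cur + 1) ys) else max 1 (pvFut y 1 ys)

def pvMaxD (L : List Int) : Int := (PySem.List.max? L (fun y => y)).getD 0

lemma pvMaxD_nil : pvMaxD [] = 0 := rfl

lemma pvMaxD_snoc (K : List Int) (c : Int) (hc : 0 ≤ c) :
    pvMaxD (K ++ [c]) = max (pvMaxD K) c := by
  cases K with
  | nil =>
    show pvMaxD [c] = max (pvMaxD []) c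
    rw [pvMaxD_nil]
    simp [pvMaxD, PySem.List.max?_id_cons]
    omega
  | cons h t =>
    simp [pvMaxD, PySem.List.max?_id_cons, List.foldl_append]

lemma foldA (arr : List Int) : ∀ (k : Nat) (i l m x : Int),
    0 ≤ l → l ≤ i → i + k = arr.length → 0 ≤ m →
    (l < arr.length → PySem.List.pyGetD arr l 0 = x) →
    ((PySem.List.pyRange i (arr.length : Int) 1).foldl (fun (st : Int × Int) right =>
      let left := if PySem.List.pyGetD arr right 0 ≠ PySem.List.pyGetD arr st.2 0 then right else st.2
      (max st.1 (right - left + 1), left)) (m, l)).1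
    = max m (pvFut x (i - l) (arr.drop i.toNat)) := by
  intro k
  induction k with
  | zero =>
    intro i l m x h0l hli hik hm hx
    rw [PySem.List.pyRange_one_eq_nil (by omega)]
    have : arr.drop i.toNat = [] := by
      apply List.drop_eq_nil_of_le; omega
    simp [this, pvFut]; omega
  | succ k ih =>
    intro i l m x h0l hli hik hm hx
    have hin : i < (arr.length : Int) := by omega
    have hiN : i.toNat < arr.length := by omega
    have hgi : PySem.List.pyGetD arr i 0 = arr[i.toNat] :=
      PySem.List.pyGetD_eq_getElem arr 0 (by omega) hin
    have hgl : PySem.List.pyGetD arr l 0 = x := hx (by omega)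
    have hdrop : arr.drop i.toNat = arr[i.toNat] :: arr.drop (i.toNat + 1) :=
      List.drop_eq_getElem_cons hiN
    have htn : (i + 1).toNat = i.toNat + 1 := by omega
    rw [PySem.List.pyRange_one_cons (by omega), List.foldl_cons]
    by_cases hyx : arr[i.toNat] = x
    · have hstep : (let left := if PySem.List.pyGetD arr i 0 ≠ PySem.List.pyGetD arr (m, l).2 0 then i else (m, l).2;
          ((max (m, l).1 (i - left + 1), left) : Int × Int)) = (max m (i - l + 1), l) := by
        simp [hgi, hgl, hyx]
      rw [hstep, ih (i + 1) l (max m (i - l + 1)) x h0l (by omega) (by omega) (by omega) hx,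
        hdrop, htn]
      simp only [pvFut]
      rw [if_pos hyx]
      have h21 : i + 1 - l = i - l + 1 := by ring
      rw [h21]
      omega
    · have hstep : (let left := if PySem.List.pyGetD arr i 0 ≠ PySem.List.pyGetD arr (m, l).2 0 then i else (m, l).2;
          ((max (m, l).1 (i - left + 1), left) : Int × Int)) = (max m 1, i) := by
        simp [hgi, hgl, hyx]
      rw [hstep, ih (i + 1) i (max m 1) arr[i.toNat] (by omega) (by omega) (by omega) (by omega)
        (fun _ => hgi), hdrop, htn]
      simp only [pvFut]
      rw [if_neg hyx]
      have h21 : i + 1 - i = 1 := by ring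
      rw [h21]
      omega

lemma foldB (rest : List Int) : ∀ (K : List Int) (cur last : Int), 1 ≤ cur →
    pvMaxD ((rest.foldl (fun (st : List Int × Option Int) x =>
      if st.1.isEmpty = false ∧ some x = st.2 then
        (st.1.dropLast ++ [st.1.getLastD 0 + 1], some x)
      else
        (st.1 ++ [1], some x)) (K ++ [cur], some last)).1)
    = max (pvMaxD K) (max cur (pvFut last cur rest)) := by
  induction rest with
  | nil =>
    intro K cur last hcur
    simp only [List.foldl_nil, pvFut]
    rw [pvMaxD_snoc K cur (by omega)]
    omega
  | cons y ys ih =>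
    intro K cur last hcur
    rw [List.foldl_cons]
    by_cases hyl : y = last
    · have hstep : (if ((K ++ [cur], some last) : List Int × Option Int).1.isEmpty = false ∧ some y = ((K ++ [cur], some last) : List Int × Option Int).2 then
            (((K ++ [cur], some last) : List Int × Option Int).1.dropLast ++ [((K ++ [cur], some last) : List Int × Option Int).1.getLastD 0 + 1], some y)
          else
            (((K ++ [cur], some last) : List Int × Option Int).1 ++ [1], some y))
          = ((K ++ [cur + 1], some last) : List Int × Option Int) := by
        rw [if_pos (by simp [hyl])]
        simp [hyl]
      rw [hstep, ih K (cur + 1) last (by omega)]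
      simp only [pvFut]
      rw [if_pos hyl]
      omega
    · have hstep : (if ((K ++ [cur], some last) : List Int × Option Int).1.isEmpty = false ∧ some y = ((K ++ [cur], some last) : List Int × Option Int).2 then
            (((K ++ [cur], some last) : List Int × Option Int).1.dropLast ++ [((K ++ [cur], some last) : List Int × Option Int).1.getLastD 0 + 1], some y)
          else
            (((K ++ [cur], some last) : List Int × Option Int).1 ++ [1], some y))
          = (((K ++ [cur]) ++ [1], some y) : List Int × Option Int) := by
        rw [if_neg (by simp [hyl])]
      rw [hstep, ih (K ++ [cur]) 1 y (by omega)]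
      rw [pvMaxD_snoc K cur (by omega)]
      simp only [pvFut]
      rw [if_neg hyl]
      omega

-- ===== VERDICT (by name: the statement is the Claim_ definition above) =====
theorem longest_uniform_subarray_spec : Claim_equal_longest_uniform_subarray := by
  unfold Claim_equal_longest_uniform_subarray Spec_longest_uniform_subarray
  intro arr _
  cases arr with
  | nil => rfl
  | cons a xs =>
    show ((PySem.List.pyRange 0 (((a :: xs).length : Nat) : Int) 1).foldl (fun (st : Int × Int) right =>
        let left := if PySem.List.pyGetD (a :: xs) right 0 ≠ PySem.List.pyGetD (a :: xs) st.2 0 then right else st.2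
        (max st.1 (right - left + 1), left)) (0, 0)).1
      = pvMaxD (((a :: xs).foldl (fun (st : List Int × Option Int) x =>
        if st.1.isEmpty = false ∧ some x = st.2 then
          (st.1.dropLast ++ [st.1.getLastD 0 + 1], some x)
        else
          (st.1 ++ [1], some x)) ([], none)).1)
    rw [foldA (a :: xs) (a :: xs).length 0 0 0 a (by omega) (by omega) (by omega) (by omega)
      (fun _ => PySem.List.pyGetD_zero_cons a xs 0)]
    rw [show ((a :: xs).foldl (fun (st : List Int × Option Int) x =>
        if st.1.isEmpty = false ∧ some x = st.2 then
          (st.1.dropLast ++ [st.1.getLastD 0 + 1], some x)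
        else
          (st.1 ++ [1], some x)) ([], none)) = (xs.foldl (fun (st : List Int × Option Int) x =>
        if st.1.isEmpty = false ∧ some x = st.2 then
          (st.1.dropLast ++ [st.1.getLastD 0 + 1], some x)
        else
          (st.1 ++ [1], some x)) (([] : List Int) ++ [1], some a)) from by rw [List.foldl_cons]; rfl]
    rw [foldB xs ([] : List Int) 1 a (by omega)]
    rw [pvMaxD_nil]
    norm_num [pvFut]
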